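-- pv_equiv track=rewrite | github.com/Sayemum/CS412_F24 | HW/HW4/cs412_rockets_dynamic.py | find_min_sections
-- ===== SOURCE A (Python) =====
-- def find_min_sections(section_lengths, height):
--     cache = [float('inf')] * (height + 1)
--     cache[0] = 0
--
--     section_count = [[0] * len(section_lengths) for _ in range(height + 1)]
--
--     # Fill the array
--     for i in range(1, height + 1):
--         for j, section in enumerate(section_lengths):
--             if i - section >= 0 and cache[i - section] != float('inf'):
--                 if cache[i] > cache[i - section] + 1:
--                     cache[i] = cache[i - section] + 1
--                     section_count[i] = section_count[i - section][:]
--                     section_count[i][j] += 1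
--
--     if cache[height] == float('inf'):
--         return -1, []
--
--     return cache[height], section_count[height]
-- ===== SOURCE B (Python) =====
-- def find_min_sections(section_lengths, height):
--     INF = float('inf')
--     cache = [INF] * (height + 1)
--     cache[0] = 0
--     choice = [-1] * (height + 1)
--     # fill: for each height i keep only a back-pointer to the first section index
--     # attaining the minimum, instead of copying whole count rows
--     for i in range(1, height + 1):
--         best, bj = INF, -1
--         for j, s in enumerate(section_lengths):
--             if i - s >= 0 and cache[i - s] + 1 < best:
--                 best, bj = cache[i - s] + 1, j
--         cache[i], choice[i] = best, bj
--     if cache[height] == INF: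
--         return -1, []
--     # reconstruct the per-section counts by walking the back-pointers
--     counts = [0] * len(section_lengths)
--     i = height
--     while i > 0:
--         j = choice[i]
--         counts[j] += 1
--         i -= section_lengths[j]
--     return cache[height], counts
-- ===== Notes on version B (the rewrite author's own statement) =====
-- stated objective: alternative
-- what changed: B replaces A's per-cell copying of whole count rows by a back-pointer array (first section index attaining the minimum, found by a local best/argmin scan) plus a single reconstruction walk after the table is filled.
import Mathlib
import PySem

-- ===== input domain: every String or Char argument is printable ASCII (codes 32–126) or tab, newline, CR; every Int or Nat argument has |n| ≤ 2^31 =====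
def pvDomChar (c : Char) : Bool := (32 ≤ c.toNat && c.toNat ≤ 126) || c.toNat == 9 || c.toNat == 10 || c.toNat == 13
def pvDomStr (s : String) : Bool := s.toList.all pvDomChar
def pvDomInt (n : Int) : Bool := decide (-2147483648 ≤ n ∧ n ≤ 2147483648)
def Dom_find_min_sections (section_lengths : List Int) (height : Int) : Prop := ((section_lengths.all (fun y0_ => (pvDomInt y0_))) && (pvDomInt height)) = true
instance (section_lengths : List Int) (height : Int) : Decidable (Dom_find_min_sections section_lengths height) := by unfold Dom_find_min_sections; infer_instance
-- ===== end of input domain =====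

-- B replaces A's per-cell copying of whole count rows by a back-pointer array plus one
-- reconstruction walk after the table is filled.

-- ===== PORT A =====
-- float('inf') is only a sentinel in A: a cache cell is Option Int with none = inf.
-- `cache[i] > cache[i-s] + 1` with cache[i] possibly inf:
def pvInfGt (o : Option Int) (x : Int) : Bool :=
  match o with | none => true | some a => decide (x < a)

-- inner-loop body of A for cell i and enumerate pair js = (j, section).
-- Python raises IndexError when i - section is out of range; those inputs are outside
-- Pre_find_min_sections, here the out-of-range read is a skip.
def pvStepA (section_lengths : List Int) (i : Int)
    (st : List (Option Int) × List (List Int)) (js : Int × Int) :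
    List (Option Int) × List (List Int) :=
  match (if 0 ≤ i - js.2 then PySem.List.pyGet? st.1 (i - js.2) else none) with
  | some (some w) =>
    if pvInfGt (st.1.getD i.toNat none) (w + 1) then
      (st.1.set i.toNat (some (w + 1)),
       st.2.set i.toNat ((st.2.getD (i - js.2).toNat []).modify js.1.toNat (· + 1)))
    else st
  | _ => st

def find_min_sections (section_lengths : List Int) (height : Int) : Int × List Int :=
  let cache0 := (List.replicate (height + 1).toNat (none : Option Int)).set 0 (some 0)
  let counts0 := List.replicate (height + 1).toNat (List.replicate section_lengths.length (0 : Int))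
  let st := (PySem.List.pyRange 1 (height + 1) 1).foldl
      (fun st i => (PySem.List.enumerate section_lengths).foldl (pvStepA section_lengths i) st)
      (cache0, counts0)
  match st.1.getD height.toNat none with
  | none => (-1, [])
  | some v => (v, st.2.getD height.toNat [])

-- ===== PORT B =====
-- `cache[i-s] + 1 < best` with best possibly inf:
def pvLtInf (x : Int) (o : Option Int) : Bool :=
  match o with | none => true | some b => decide (x < b)

-- inner scan of B: running (best, bj) over enumerate pairs js = (j, section).
def pvStepB (cache : List (Option Int)) (i : Int)
    (bb : Option Int × Int) (js : Int × Int) : Option Int × Int :=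
  match (if 0 ≤ i - js.2 then PySem.List.pyGet? cache (i - js.2) else none) with
  | some (some w) => if pvLtInf (w + 1) bb.1 then (some (w + 1), js.1) else bb
  | _ => bb

-- one iteration of B's fill loop: compute (best, bj) locally, then write the cell.
def pvFillB (section_lengths : List Int)
    (st : List (Option Int) × List Int) (i : Int) : List (Option Int) × List Int :=
  let bb := (PySem.List.enumerate section_lengths).foldl (pvStepB st.1 i) (none, -1)
  (st.1.set i.toNat bb.1, st.2.set i.toNat bb.2)

-- B's reconstruction while-loop; the fuel only makes it total: on inputs satisfying
-- Pre_find_min_sections each step lowers i by the chosen section length (≥ 1 on the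
-- walked path), so height.toNat iterations always suffice.
def pvRebuild (section_lengths : List Int) (choice : List Int)
    (counts : List Int) (i : Int) : Nat → List Int
  | 0 => counts
  | fuel + 1 =>
    if 0 < i then
      let j := choice.getD i.toNat 0
      pvRebuild section_lengths choice (counts.modify j.toNat (· + 1))
        (i - section_lengths.getD j.toNat 0) fuel
    else counts

def find_min_sections_alt (section_lengths : List Int) (height : Int) : Int × List Int :=
  let cache0 := (List.replicate (height + 1).toNat (none : Option Int)).set 0 (some 0)
  let choice0 := List.replicate (height + 1).toNat (-1 : Int)
  let st := (PySem.List.pyRange 1 (height + 1) 1).foldl (pvFillB section_lengths)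
      (cache0, choice0)
  match st.1.getD height.toNat none with
  | none => (-1, [])
  | some v =>
    (v, pvRebuild section_lengths st.2 (List.replicate section_lengths.length 0)
          height height.toNat)

-- ===== PRECONDITION & SPEC =====
-- Pre_ is exactly where Python A returns: height ≥ 0 (else cache[0] raises IndexError on an
-- empty cache), and, unless height = 0, no negative section length (a negative section makes
-- cache[i - section] raise IndexError at i = height).
def Pre_find_min_sections (section_lengths : List Int) (height : Int) : Prop :=
  0 ≤ height ∧ (height = 0 ∨ ∀ s ∈ section_lengths, 0 ≤ s)
instance (section_lengths : List Int) (height : Int) : Decidable (Pre_find_min_sections section_lengths height) := by unfold Pre_find_min_sections; infer_instance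

def pvWitness_find_min_sections : List Int × Int := ([2, 3], 7)

def Spec_find_min_sections (section_lengths : List Int) (height : Int) (out : Int × List Int) : Prop := out = find_min_sections_alt section_lengths height
instance (section_lengths : List Int) (height : Int) (out : Int × List Int) : Decidable (Spec_find_min_sections section_lengths height out) := by unfold Spec_find_min_sections; infer_instance

-- ===== CLAIM (what is proved, stated in full; the proofs are below) =====
def Claim_equal_find_min_sections : Prop := ∀ (section_lengths : List Int) (height : Int), Dom_find_min_sections section_lengths height → Pre_find_min_sections section_lengths height → Spec_find_min_sections section_lengths height (find_min_sections section_lengths height)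

-- ===== LEMMAS AND PROOFS =====

theorem pvGetD_set_self {α : Type} (l : List α) (i : Nat) (v d : α) (h : i < l.length) :
    (l.set i v).getD i d = v := by
  simp [List.getD, List.getElem?_set, h]

theorem pvGetD_set_ne {α : Type} (l : List α) {i k : Nat} (h : i ≠ k) (v d : α) :
    (l.set i v).getD k d = l.getD k d := by
  simp [List.getD, List.getElem?_set, h]

theorem pvSet_getD_self {α : Type} (l : List α) (i : Nat) (d : α)
    (h : l.getD i d = d) : l.set i d = l := by
  apply List.ext_getElem?
  intro k
  rw [List.getElem?_set]
  by_cases hk : i = k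
  · subst hk
    by_cases hl : i < l.length
    · rw [List.getD, List.getElem?_eq_getElem hl] at h
      simp only [Option.getD_some] at h
      simp [hl, List.getElem?_eq_getElem hl, h]
    · simp [hl]
  · simp [hk]

theorem pvModify_comm {α : Type} (l : List α) (a b : Nat) (f : α → α) :
    (l.modify a f).modify b f = (l.modify b f).modify a f := by
  by_cases hab : a = b
  · subst hab; rfl
  · apply List.ext_getElem?
    intro k
    simp only [List.getElem?_modify]
    cases l[k]? with
    | none => simp
    | some x =>
      by_cases ha : a = k <;> by_cases hb : b = k <;> simp [ha, hb] <;> omega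

-- members of enumerate are (index, element) pairs
theorem pvMem_enumerate (sl : List Int) (s : Int) (p : Int × Int)
    (hp : p ∈ PySem.List.enumerate sl s) :
    ∃ k : Nat, k < sl.length ∧ p.1 = s + k ∧ sl.getD k 0 = p.2 := by
  induction sl generalizing s with
  | nil => simp [PySem.List.enumerate_nil] at hp
  | cons x xs ih =>
    rw [PySem.List.enumerate_cons] at hp
    rcases List.mem_cons.mp hp with h | h
    · refine ⟨0, by simp, ?_, ?_⟩
      · rw [h]; simp
      · rw [h]; simp [List.getD]
    · obtain ⟨k, hk, h1, h2⟩ := ih (s + 1) h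
      exact ⟨k + 1, by simpa using hk, by omega, by simpa [List.getD] using h2⟩

-- the per-cell relation maintained by both fills (k ≥ 1): either unreachable, or the cell
-- records the first section index attaining the minimum, and A's count row there is the
-- count row of the predecessor cell with that index bumped
def pvCell (sl : List Int) (cache : List (Option Int)) (choice : List Int)
    (counts : List (List Int)) (k : Nat) : Prop :=
  (cache.getD k none = none ∧ choice.getD k 0 = -1 ∧
    counts.getD k [] = List.replicate sl.length 0)
  ∨ (∃ w : Int, ∃ j : Nat, cache.getD k none = some w ∧ choice.getD k 0 = (j : Int) ∧
      j < sl.length ∧ 1 ≤ sl.getD j 0 ∧ (sl.getD j 0).toNat ≤ k ∧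
      cache.getD (k - (sl.getD j 0).toNat) none = some (w - 1) ∧
      counts.getD k [] = (counts.getD (k - (sl.getD j 0).toNat) []).modify j (· + 1))

-- the loop invariant after processing cells 1..m
def pvInv (sl : List Int) (hp m : Nat) (cache : List (Option Int)) (choice : List Int)
    (counts : List (List Int)) : Prop :=
  cache.length = hp ∧ choice.length = hp ∧ counts.length = hp ∧
  cache.getD 0 none = some 0 ∧ counts.getD 0 [] = List.replicate sl.length 0 ∧
  (∀ k : Nat, 1 ≤ k → k ≤ m → pvCell sl cache choice counts k) ∧
  (∀ k : Nat, m < k → k < hp → cache.getD k none = none ∧ choice.getD k 0 = -1 ∧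
      counts.getD k [] = List.replicate sl.length 0)

theorem pvCell_congr (sl : List Int) {cache cache' : List (Option Int)}
    {choice choice' : List Int} {counts counts' : List (List Int)} (k : Nat)
    (hc : ∀ t : Nat, t ≤ k → cache'.getD t none = cache.getD t none)
    (hch : choice'.getD k 0 = choice.getD k 0)
    (hcnt : ∀ t : Nat, t ≤ k → counts'.getD t [] = counts.getD t [])
    (hk : pvCell sl cache choice counts k) : pvCell sl cache' choice' counts' k := by
  unfold pvCell at *
  rcases hk with ⟨h1, h2, h3⟩ | ⟨w, j, h1, h2, h3, h4, h5, h6, h7⟩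
  · exact Or.inl ⟨by rw [hc k le_rfl]; exact h1, by rw [hch]; exact h2,
      by rw [hcnt k le_rfl]; exact h3⟩
  · exact Or.inr ⟨w, j, by rw [hc k le_rfl]; exact h1, by rw [hch]; exact h2, h3, h4, h5,
      by rw [hc _ (by omega)]; exact h6,
      by rw [hcnt k le_rfl, hcnt _ (by omega)]; exact h7⟩

-- relation between A's inner-loop state and B's running (best, bj)
def pvRel (sl : List Int) (m : Nat) (cache : List (Option Int)) (counts : List (List Int))
    (stA : List (Option Int) × List (List Int)) (bb : Option Int × Int) : Prop :=
  stA.1 = cache.set (m + 1) bb.1 ∧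
  ((bb.1 = none ∧ bb.2 = -1 ∧ stA.2 = counts) ∨
   (∃ w : Int, ∃ j : Nat, bb.1 = some w ∧ bb.2 = (j : Int) ∧ j < sl.length ∧
      1 ≤ sl.getD j 0 ∧ (sl.getD j 0).toNat ≤ m + 1 ∧
      cache.getD (m + 1 - (sl.getD j 0).toNat) none = some (w - 1) ∧
      stA.2 = counts.set (m + 1) ((counts.getD (m + 1 - (sl.getD j 0).toNat) []).modify j (· + 1))))

theorem pvStepRel (sl : List Int) (hp m : Nat)
    (cache : List (Option Int)) (counts : List (List Int))
    (hlen : cache.length = hp) (hm : m + 1 < hp)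
    (hun : ∀ k : Nat, m < k → k < hp → cache.getD k none = none)
    (p : Int × Int) (hp0 : 0 ≤ p.1) (hpn : p.1.toNat < sl.length)
    (hps : sl.getD p.1.toNat 0 = p.2)
    (stA : List (Option Int) × List (List Int)) (bb : Option Int × Int)
    (hRel : pvRel sl m cache counts stA bb) :
    pvRel sl m cache counts (pvStepA sl ((m : Int) + 1) stA p)
      (pvStepB cache ((m : Int) + 1) bb p) := by
  obtain ⟨hA1, hdisj⟩ := hRel
  have hiN : ((m : Int) + 1).toNat = m + 1 := by omega
  by_cases hpos : 0 ≤ (m : Int) + 1 - p.2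
  · -- in-bounds guard true
    obtain ⟨t, ht⟩ : ∃ t : Nat, (m : Int) + 1 - p.2 = (t : Int) :=
      ⟨((m : Int) + 1 - p.2).toNat, (Int.toNat_of_nonneg hpos).symm⟩
    have hget : ∀ (l : List (Option Int)),
        (if 0 ≤ (m : Int) + 1 - p.2 then PySem.List.pyGet? l ((m : Int) + 1 - p.2) else none)
          = l[t]? := by
      intro l; rw [if_pos hpos, ht]; simp
    by_cases htI : t = m + 1
    · -- reading the cell being filled: both sides skip
      have hBv : cache[t]? = some none := by
        rw [List.getElem?_eq_getElem (by omega)]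
        have := hun (m+1) (by omega) hm
        rw [List.getD, List.getElem?_eq_getElem (by omega : m+1 < cache.length)] at this
        simp at this
        simp [htI, this]
      have hAv : stA.1[t]? = some bb.1 := by
        rw [hA1, htI, List.getElem?_set, if_pos rfl, if_pos (by omega)]
      unfold pvStepA pvStepB
      rw [hget, hget, hAv, hBv]
      cases hbb : bb.1 with
      | none => exact ⟨hA1, hdisj⟩
      | some w =>
        have : stA.1.getD ((m:Int)+1).toNat none = some w := by
          rw [hA1, hiN, pvGetD_set_self _ _ _ _ (by omega), hbb]
        simp only [this, pvInfGt]
        rw [if_neg (by simp)]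
        exact ⟨hA1, hdisj⟩
    · -- reading an older (or out-of-range) cell: both read the same value
      have hsame : stA.1[t]? = cache[t]? := by
        rw [hA1, List.getElem?_set, if_neg (by omega)]
      unfold pvStepA pvStepB
      rw [hget, hget, hsame]
      cases hv : cache[t]? with
      | none => exact ⟨hA1, hdisj⟩
      | some c =>
        cases c with
        | none => exact ⟨hA1, hdisj⟩
        | some w =>
          -- a finite candidate: t must be an already-final cell, so p.2 ≥ 1
          have htlen : t < hp := by
            by_contra hc
            rw [List.getElem?_eq_none (by omega)] at hv
            simp at hv
          have htm : t ≤ m := by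
            by_contra hc
            have := hun t (by omega) htlen
            rw [List.getD, hv] at this
            simp at this
          have hAgetD : stA.1.getD ((m:Int)+1).toNat none = bb.1 := by
            rw [hA1, hiN, pvGetD_set_self _ _ _ _ (by omega)]
          have hcond : pvInfGt bb.1 (w + 1) = pvLtInf (w + 1) bb.1 := by
            cases bb.1 <;> rfl
          simp only [hAgetD, hcond]
          by_cases hc : pvLtInf (w + 1) bb.1 = true
          · rw [if_pos hc, if_pos hc]
            have hs1 : 1 ≤ p.2 := by omega
            have hs2 : p.2 ≤ (m : Int) + 1 := by omega
            have hgd : cache.getD t none = some w := by rw [List.getD, hv]; rfl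
            have hidx : m + 1 - p.2.toNat = t := by omega
            refine ⟨?_, Or.inr ⟨w + 1, p.1.toNat, rfl, (Int.toNat_of_nonneg hp0).symm, hpn,
              ?_, ?_, ?_, ?_⟩⟩
            · rw [hA1, hiN, List.set_set]
            · rw [hps]; exact hs1
            · rw [hps]; omega
            · rw [hps, hidx, hgd]; norm_num
            · have htt : ((m : Int) + 1 - p.2).toNat = t := by rw [ht]; exact Int.toNat_natCast t
              rw [hiN, htt, hps, hidx]
              rcases hdisj with ⟨_, _, h2⟩ | ⟨w', j', _, _, _, _, _, _, h2⟩
              · rw [h2]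
              · rw [h2, pvGetD_set_ne _ (by omega), List.set_set]
          · rw [if_neg hc, if_neg hc]
            exact ⟨hA1, hdisj⟩
  · -- guard false: both skip
    unfold pvStepA pvStepB
    rw [if_neg hpos, if_neg hpos]
    exact ⟨hA1, hdisj⟩

theorem pvInner (sl : List Int) (hp m : Nat)
    (cache : List (Option Int)) (counts : List (List Int))
    (hlen : cache.length = hp) (hm : m + 1 < hp)
    (hun : ∀ k : Nat, m < k → k < hp → cache.getD k none = none) :
    ∀ (l : List (Int × Int)),
      (∀ p ∈ l, 0 ≤ p.1 ∧ p.1.toNat < sl.length ∧ sl.getD p.1.toNat 0 = p.2) →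
      ∀ stA bb, pvRel sl m cache counts stA bb →
      pvRel sl m cache counts (l.foldl (pvStepA sl ((m : Int) + 1)) stA)
        (l.foldl (pvStepB cache ((m : Int) + 1)) bb) := by
  intro l
  induction l with
  | nil => intro _ stA bb h; exact h
  | cons p l ih =>
    intro H stA bb h
    have hp' := H p List.mem_cons_self
    exact ih (fun q hq => H q (List.mem_cons_of_mem _ hq)) _ _
      (pvStepRel sl hp m cache counts hlen hm hun p hp'.1 hp'.2.1 hp'.2.2 stA bb h)

theorem pvOuterStep (sl : List Int) (hp m : Nat)
    (cache : List (Option Int)) (choice : List Int) (counts : List (List Int))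
    (hInv : pvInv sl hp m cache choice counts) (hm : m + 1 < hp) :
    ((PySem.List.enumerate sl).foldl (pvStepA sl ((m : Int) + 1)) (cache, counts)).1
      = (pvFillB sl (cache, choice) ((m : Int) + 1)).1 ∧
    pvInv sl hp (m + 1) (pvFillB sl (cache, choice) ((m : Int) + 1)).1
      (pvFillB sl (cache, choice) ((m : Int) + 1)).2
      ((PySem.List.enumerate sl).foldl (pvStepA sl ((m : Int) + 1)) (cache, counts)).2 := by
  obtain ⟨hcl, hchl, hctl, hc0, hct0, hcell, hun⟩ := hInv
  have hiN : ((m : Int) + 1).toNat = m + 1 := by omega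
  have hinit : pvRel sl m cache counts (cache, counts) (none, -1) := by
    constructor
    · exact (pvSet_getD_self cache (m + 1) none (hun (m + 1) (by omega) hm).1).symm
    · exact Or.inl ⟨rfl, rfl, rfl⟩
  have hmem : ∀ p ∈ PySem.List.enumerate sl,
      0 ≤ p.1 ∧ p.1.toNat < sl.length ∧ sl.getD p.1.toNat 0 = p.2 := by
    intro p hpm
    obtain ⟨k, hk, h1, h2⟩ := pvMem_enumerate sl 0 p hpm
    refine ⟨by omega, ?_, ?_⟩
    · rw [show p.1.toNat = k from by omega]; exact hk
    · rw [show p.1.toNat = k from by omega]; exact h2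
  have hrel := pvInner sl hp m cache counts hcl hm (fun k h1 h2 => (hun k h1 h2).1)
      (PySem.List.enumerate sl) hmem (cache, counts) (none, -1) hinit
  set stA := (PySem.List.enumerate sl).foldl (pvStepA sl ((m : Int) + 1)) (cache, counts)
    with hstA
  set bb := (PySem.List.enumerate sl).foldl (pvStepB cache ((m : Int) + 1)) (none, -1)
    with hbb
  obtain ⟨hA1, hdisj⟩ := hrel
  have hfill : pvFillB sl (cache, choice) ((m : Int) + 1)
      = (cache.set (m + 1) bb.1, choice.set (m + 1) bb.2) := by
    unfold pvFillB
    rw [hiN]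
  rw [hfill]
  refine ⟨by rw [hA1], ?_⟩
  have hcnt' : ∀ t : Nat, t ≠ m + 1 → stA.2.getD t [] = counts.getD t [] := by
    intro t ht
    rcases hdisj with ⟨_, _, h2⟩ | ⟨w, j, _, _, _, _, _, _, h2⟩
    · rw [h2]
    · rw [h2, pvGetD_set_ne _ (by omega)]
  have hctl' : stA.2.length = hp := by
    rcases hdisj with ⟨_, _, h2⟩ | ⟨w, j, _, _, _, _, _, _, h2⟩ <;> rw [h2] <;> simp [hctl]
  refine ⟨by simp [hcl], by simp [hchl], hctl', ?_, ?_, ?_, ?_⟩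
  · rw [pvGetD_set_ne _ (by omega)]; exact hc0
  · rw [hcnt' 0 (by omega)]; exact hct0
  · intro k hk1 hkm
    by_cases hke : k = m + 1
    · subst hke
      rcases hdisj with ⟨h1, h2, h3⟩ | ⟨w, j, h1, h2, h3, h4, h5, h6, h7⟩
      · exact Or.inl ⟨by rw [pvGetD_set_self _ _ _ _ (by omega), h1],
          by rw [pvGetD_set_self _ _ _ _ (by omega), h2],
          by rw [h3]; exact (hun (m + 1) (by omega) hm).2.2⟩
      · refine Or.inr ⟨w, j, by rw [pvGetD_set_self _ _ _ _ (by omega), h1],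
          by rw [pvGetD_set_self _ _ _ _ (by omega), h2], h3, h4, h5, ?_, ?_⟩
        · rw [pvGetD_set_ne _ (by omega)]; exact h6
        · rw [h7, pvGetD_set_self _ _ _ _ (by omega : m + 1 < counts.length),
            pvGetD_set_ne _ (by omega)]
    · have hcell' := hcell k hk1 (by omega)
      refine pvCell_congr sl k ?_ ?_ ?_ hcell'
      · intro t ht; rw [pvGetD_set_ne _ (by omega)]
      · rw [pvGetD_set_ne _ (by omega)]
      · intro t ht; exact hcnt' t (by omega)
  · intro k hk1 hk2
    have h := hun k (by omega) hk2
    exact ⟨by rw [pvGetD_set_ne _ (by omega)]; exact h.1,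
      by rw [pvGetD_set_ne _ (by omega)]; exact h.2.1,
      by rw [hcnt' k (by omega)]; exact h.2.2⟩

theorem pvInv_init (sl : List Int) (hp : Nat) (h1 : 1 ≤ hp) :
    pvInv sl hp 0 ((List.replicate hp (none : Option Int)).set 0 (some 0))
      (List.replicate hp (-1 : Int))
      (List.replicate hp (List.replicate sl.length (0 : Int))) := by
  unfold pvInv
  refine ⟨by simp, by simp, by simp, ?_, ?_, ?_, ?_⟩
  · have h0 : (0 : Nat) < hp := h1
    simp [List.getD, List.getElem?_set, h0]
  · have h0 : (0 : Nat) < hp := h1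
    simp [List.getD, List.getElem?_replicate, h0]
  · intro k hk1 hk0; omega
  · intro k hmk hkhp
    refine ⟨?_, ?_, ?_⟩
    · rw [pvGetD_set_ne _ (by omega)]
      simp [List.getD, List.getElem?_replicate, hkhp]
    · simp [List.getD, List.getElem?_replicate, hkhp]
    · simp [List.getD, List.getElem?_replicate, hkhp]

theorem pvFillLoop (sl : List Int) (H : Nat) :
    ∀ m : Nat, m ≤ H →
    ((PySem.List.pyRange 1 (1 + (m : Int)) 1).foldl
        (fun st i => (PySem.List.enumerate sl).foldl (pvStepA sl i) st)
        ((List.replicate (H + 1) (none : Option Int)).set 0 (some 0),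
         List.replicate (H + 1) (List.replicate sl.length (0 : Int)))).1
      = ((PySem.List.pyRange 1 (1 + (m : Int)) 1).foldl (pvFillB sl)
        ((List.replicate (H + 1) (none : Option Int)).set 0 (some 0),
         List.replicate (H + 1) (-1 : Int))).1 ∧
    pvInv sl (H + 1) m
      ((PySem.List.pyRange 1 (1 + (m : Int)) 1).foldl (pvFillB sl)
        ((List.replicate (H + 1) (none : Option Int)).set 0 (some 0),
         List.replicate (H + 1) (-1 : Int))).1
      ((PySem.List.pyRange 1 (1 + (m : Int)) 1).foldl (pvFillB sl)
        ((List.replicate (H + 1) (none : Option Int)).set 0 (some 0),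
         List.replicate (H + 1) (-1 : Int))).2
      ((PySem.List.pyRange 1 (1 + (m : Int)) 1).foldl
        (fun st i => (PySem.List.enumerate sl).foldl (pvStepA sl i) st)
        ((List.replicate (H + 1) (none : Option Int)).set 0 (some 0),
         List.replicate (H + 1) (List.replicate sl.length (0 : Int)))).2 := by
  intro m
  induction m with
  | zero =>
    intro _
    rw [show (1 + ((0 : Nat) : Int)) = 1 by norm_num, PySem.List.pyRange_one_eq_nil le_rfl]
    exact ⟨rfl, pvInv_init sl (H + 1) (by omega)⟩
  | succ m ih =>
    intro hmH
    obtain ⟨heq, hinv⟩ := ih (by omega)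
    have hsplit : PySem.List.pyRange 1 (1 + ((m + 1 : Nat) : Int)) 1
        = PySem.List.pyRange 1 (1 + (m : Int)) 1 ++ [1 + (m : Int)] := by
      rw [show (1 + ((m + 1 : Nat) : Int)) = (1 + (m : Int)) + 1 by push_cast; ring]
      exact PySem.List.pyRange_one_succ_right (by omega)
    rw [hsplit, List.foldl_append, List.foldl_append]
    simp only [List.foldl_cons, List.foldl_nil]
    set stA := ((PySem.List.pyRange 1 (1 + (m : Int)) 1).foldl
        (fun st i => (PySem.List.enumerate sl).foldl (pvStepA sl i) st)
        ((List.replicate (H + 1) (none : Option Int)).set 0 (some 0),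
         List.replicate (H + 1) (List.replicate sl.length (0 : Int)))) with hstA
    set stB := ((PySem.List.pyRange 1 (1 + (m : Int)) 1).foldl (pvFillB sl)
        ((List.replicate (H + 1) (none : Option Int)).set 0 (some 0),
         List.replicate (H + 1) (-1 : Int))) with hstB
    have hcomm : (1 + (m : Int)) = (m : Int) + 1 := by ring
    have hstep := pvOuterStep sl (H + 1) m stB.1 stB.2 stA.2 ?_ (by omega)
    · rw [hcomm]
      have e1 : (PySem.List.enumerate sl).foldl (pvStepA sl ((m : Int) + 1)) stA
          = (PySem.List.enumerate sl).foldl (pvStepA sl ((m : Int) + 1)) (stB.1, stA.2) := by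
        rw [show stA = (stA.1, stA.2) from rfl, heq]
      have e2 : pvFillB sl stB ((m : Int) + 1) = pvFillB sl (stB.1, stB.2) ((m : Int) + 1) := by
        rfl
      rw [e1, e2]
      exact hstep
    · rw [← heq] at hinv ⊢
      rw [show stA = (stA.1, stA.2) from rfl] at hinv
      exact hinv

-- pvRebuild commutes with a pending increment of the accumulator
theorem pvRebuild_modify (sl ch : List Int) (fuel : Nat) :
    ∀ (cs : List Int) (j : Nat) (i : Int),
    pvRebuild sl ch (cs.modify j (· + 1)) i fuel =
      (pvRebuild sl ch cs i fuel).modify j (· + 1) := by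
  induction fuel with
  | zero => intro cs j i; rfl
  | succ f ih =>
    intro cs j i
    by_cases hi : 0 < i
    · simp only [pvRebuild, hi, if_pos]
      rw [pvModify_comm, ih]
    · simp [pvRebuild, hi]

-- reconstruction from the back-pointers recovers A's count row
theorem pvRebuild_eq (sl : List Int) (hp : Nat) (cache : List (Option Int))
    (choice : List Int) (counts : List (List Int))
    (hInv : pvInv sl hp (hp - 1) cache choice counts) :
    ∀ k : Nat, k < hp → ∀ w : Int, cache.getD k none = some w →
    ∀ fuel : Nat, k ≤ fuel →
    pvRebuild sl choice (List.replicate sl.length 0) (k : Int) fuel = counts.getD k [] := by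
  obtain ⟨hcl, hchl, hctl, hc0, hct0, hcell, hun⟩ := hInv
  intro k
  induction k using Nat.strong_induction_on with
  | _ k ih =>
    intro hk w hw fuel hfuel
    by_cases hk0 : k = 0
    · subst hk0
      cases fuel with
      | zero => exact hct0.symm
      | succ f => simpa [pvRebuild] using hct0.symm
    · rcases hcell k (by omega) (by omega) with ⟨h1, _, _⟩ | ⟨w', j, h1, h2, h3, h4, h5, h6, h7⟩
      · rw [h1] at hw; cases hw
      · rw [h1] at hw
        cases fuel with
        | zero => omega
        | succ f =>
          have h0k : (0 : Int) < (k : Int) := by omega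
          simp only [pvRebuild, if_pos h0k]
          have hjt : ((k : Int)).toNat = k := by omega
          rw [hjt, h2]
          have hjj : ((j : Int)).toNat = j := by omega
          rw [hjj]
          have hcast : (k : Int) - sl.getD j 0 = ((k - (sl.getD j 0).toNat : Nat) : Int) := by
            omega
          rw [hcast, pvRebuild_modify,
            ih (k - (sl.getD j 0).toNat) (by omega) (by omega) (w' - 1) h6 f (by omega), h7]

theorem pvFinal (section_lengths : List Int) (height : Int)
    (hpre : Pre_find_min_sections section_lengths height) :
    find_min_sections section_lengths height = find_min_sections_alt section_lengths height := by
  obtain ⟨hh0, -⟩ := hpre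
  obtain ⟨H, rfl⟩ : ∃ H : Nat, height = (H : Int) := ⟨height.toNat, (Int.toNat_of_nonneg hh0).symm⟩
  obtain ⟨heq, hinv⟩ := pvFillLoop section_lengths H H le_rfl
  unfold find_min_sections find_min_sections_alt
  have hb : ((H : Int) + 1) = 1 + (H : Int) := by ring
  have hbt : ((H : Int) + 1).toNat = H + 1 := by omega
  have hht : ((H : Int)).toNat = H := by omega
  simp only [hbt, hht]
  simp only [hb]
  rw [heq]
  set stB := ((PySem.List.pyRange 1 (1 + (H : Int)) 1).foldl (pvFillB section_lengths)
      ((List.replicate (H + 1) (none : Option Int)).set 0 (some 0),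
       List.replicate (H + 1) (-1 : Int))) with hstB
  set stA := ((PySem.List.pyRange 1 (1 + (H : Int)) 1).foldl
      (fun st i => (PySem.List.enumerate section_lengths).foldl (pvStepA section_lengths i) st)
      ((List.replicate (H + 1) (none : Option Int)).set 0 (some 0),
       List.replicate (H + 1) (List.replicate section_lengths.length (0 : Int)))) with hstA
  cases hv : stB.1.getD H none with
  | none => rfl
  | some v =>
    have hinv' : pvInv section_lengths (H + 1) ((H + 1) - 1) stB.1 stB.2 stA.2 := by
      simpa using hinv
    rw [pvRebuild_eq section_lengths (H + 1) stB.1 stB.2 stA.2 hinv' H (by omega) v hv H le_rfl]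

-- ===== VERDICT (by name: the statement is the Claim_ definition above) =====
theorem find_min_sections_spec : Claim_equal_find_min_sections := by
  intro section_lengths height _ hpre
  exact pvFinal section_lengths height hpre
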